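-- pv_equiv track=rewrite | github.com/adityachopra-NS/plagiarism-detector-poc | tools/repo_tree_tokenization.py | normalize_tokens_java
-- ===== SOURCE A (Python) =====
-- JAVA_KEYWORDS = {
--     "abstract", "assert", "boolean", "break", "byte", "case", "catch",
--     "char", "class", "const", "continue", "default", "do", "double",
--     "else", "enum", "extends", "final", "finally", "float", "for",
--     "goto", "if", "implements", "import", "instanceof", "int",
--     "interface", "long", "native", "new", "package", "private",
--     "protected", "public", "return", "short", "static", "strictfp",
--     "super", "switch", "synchronized", "this", "throw", "throws",
--     "transient", "try", "void", "volatile", "while", "true", "false", "null"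
-- }
--
-- def normalize_tokens_java(tokens):
--     """
--     Normalizes tokens for Java-like languages:
--
--     - Keep Java keywords as-is (if, for, class, etc.)
--     - Replace identifiers (variable, class, method names) with generic IDs
--       like ID1, ID2, ID3 ...
--     - Replace numbers with NUM
--     - Keep operators and symbols as-is
--     """
--     normalized = []
--     identifier_map = {}
--     next_id = 1
--
--     for tok in tokens:
--         # Keyword
--         if tok in JAVA_KEYWORDS:
--             normalized.append(tok)
--         # Number
--         elif tok.isdigit():
--             normalized.append("NUM")
--         # Identifier: starts with letter or underscore
--         elif tok[0].isalpha() or tok[0] == "_":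
--             if tok not in identifier_map:
--                 identifier_map[tok] = f"ID{next_id}"
--                 next_id += 1
--             normalized.append(identifier_map[tok])
--         else:
--             # Operator or symbol
--             normalized.append(tok)
--
--     return normalized
-- ===== SOURCE B (Python) =====
-- JAVA_KEYWORDS = {
--     "abstract", "assert", "boolean", "break", "byte", "case", "catch",
--     "char", "class", "const", "continue", "default", "do", "double",
--     "else", "enum", "extends", "final", "finally", "float", "for",
--     "goto", "if", "implements", "import", "instanceof", "int",
--     "interface", "long", "native", "new", "package", "private",
--     "protected", "public", "return", "short", "static", "strictfp",
--     "super", "switch", "synchronized", "this", "throw", "throws",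
--     "transient", "try", "void", "volatile", "while", "true", "false", "null"
-- }
--
-- def normalize_tokens_java(tokens):
--     # Pass 1: assign sequential IDs to identifiers in first-appearance order.
--     identifier_map = {}
--     for tok in tokens:
--         if tok in JAVA_KEYWORDS or tok.isdigit():
--             continue
--         if (tok[0].isalpha() or tok[0] == "_") and tok not in identifier_map:
--             identifier_map[tok] = f"ID{len(identifier_map) + 1}"
--     # Pass 2: rewrite each token by direct lookup.
--     out = []
--     for tok in tokens:
--         if tok in JAVA_KEYWORDS:
--             out.append(tok)
--         elif tok.isdigit():
--             out.append("NUM")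
--         elif tok[0].isalpha() or tok[0] == "_":
--             out.append(identifier_map[tok])
--         else:
--             out.append(tok)
--     return out
-- ===== Notes on version B (the rewrite author's own statement) =====
-- stated objective: alternative
-- what changed: A builds output, identifier map and an explicit next_id counter together in one loop; B splits it into two independent passes: pass 1 builds only the identifier map (ID number derived from the map size, no counter), pass 2 rewrites every token by a direct map lookup.
import Mathlib
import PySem

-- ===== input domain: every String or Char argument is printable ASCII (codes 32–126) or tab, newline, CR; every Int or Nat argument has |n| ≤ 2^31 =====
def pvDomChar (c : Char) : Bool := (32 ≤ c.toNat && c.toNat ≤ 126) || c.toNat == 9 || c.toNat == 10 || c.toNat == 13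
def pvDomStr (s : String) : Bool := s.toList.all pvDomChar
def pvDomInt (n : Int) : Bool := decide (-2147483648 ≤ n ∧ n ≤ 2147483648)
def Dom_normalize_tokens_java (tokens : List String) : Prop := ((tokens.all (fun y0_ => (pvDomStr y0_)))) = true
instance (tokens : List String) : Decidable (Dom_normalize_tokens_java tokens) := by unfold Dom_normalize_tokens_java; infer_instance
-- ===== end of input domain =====

-- B replaces A's single pass threading (output, map, counter) by two independent passes:
-- pass 1 builds the identifier map alone (ID number = map size + 1), pass 2 rewrites each
-- token by direct lookup; same return value (objective: alternative decomposition).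

-- ===== PORT A =====
def jKeywords : List String := ["abstract", "assert", "boolean", "break", "byte", "case", "catch",
    "char", "class", "const", "continue", "default", "do", "double",
    "else", "enum", "extends", "final", "finally", "float", "for",
    "goto", "if", "implements", "import", "instanceof", "int",
    "interface", "long", "native", "new", "package", "private",
    "protected", "public", "return", "short", "static", "strictfp",
    "super", "switch", "synchronized", "this", "throw", "throws",
    "transient", "try", "void", "volatile", "while", "true", "false", "null"]

-- one iteration of A's loop over state (normalized, identifier_map, next_id)
def normAStep (st : List String × PySem.Dict String String × Int) (tok : String) :
    List String × PySem.Dict String String × Int :=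
  let (normalized, idmap, next_id) := st
  if jKeywords.contains tok then (normalized ++ [tok], idmap, next_id)
  else if PySem.Str.strIsdigit tok then (normalized ++ ["NUM"], idmap, next_id)
  else match PySem.Str.pyGet? tok 0 with   -- tok[0]; none = IndexError (excluded by Pre_)
    | some c =>
      if PySem.Chars.isalpha c || c = '_' then
        if idmap.contains tok = false then
          let idmap' := idmap.insert tok ("ID" ++ PySem.Int.toStr next_id)
          (normalized ++ [idmap'.getD tok ""], idmap', next_id + 1)
        else (normalized ++ [idmap.getD tok ""], idmap, next_id)
      else (normalized ++ [tok], idmap, next_id)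
    | none => (normalized ++ [tok], idmap, next_id)   -- unreachable under Pre_ (Python raises)

def normalize_tokens_java (tokens : List String) : List String :=
  (tokens.foldl normAStep ([], PySem.Dict.empty, 1)).1

-- ===== PORT B =====
-- pass 1: build the identifier map only
def bMapStep (m : PySem.Dict String String) (tok : String) : PySem.Dict String String :=
  if jKeywords.contains tok || PySem.Str.strIsdigit tok then m
  else match PySem.Str.pyGet? tok 0 with   -- tok[0]; none = IndexError (excluded by Pre_)
    | some c =>
      if (PySem.Chars.isalpha c || c = '_') && m.contains tok = false then
        m.insert tok ("ID" ++ PySem.Int.toStr ((m.size : Int) + 1))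
      else m
    | none => m

-- pass 2: rewrite one token by lookup in the finished map
def bRewrite (m : PySem.Dict String String) (tok : String) : String :=
  if jKeywords.contains tok then tok
  else if PySem.Str.strIsdigit tok then "NUM"
  else match PySem.Str.pyGet? tok 0 with
    | some c => if PySem.Chars.isalpha c || c = '_' then m.getD tok "" else tok
    | none => tok

def normalize_tokens_java_alt (tokens : List String) : List String :=
  let m := tokens.foldl bMapStep PySem.Dict.empty
  tokens.map (bRewrite m)

-- ===== PRECONDITION & SPEC =====
-- Pre_ excludes lists containing the empty token "", on which the Python A raises IndexError at tok[0] (B raises there too).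
def Pre_normalize_tokens_java (tokens : List String) : Prop := "" ∉ tokens
instance (tokens : List String) : Decidable (Pre_normalize_tokens_java tokens) := by
  unfold Pre_normalize_tokens_java; infer_instance
def pvWitness_normalize_tokens_java : List String := ["int", "x", "=", "5", ";", "x"]
def Spec_normalize_tokens_java (tokens : List String) (out : List String) : Prop := out = normalize_tokens_java_alt tokens
instance (tokens : List String) (out : List String) : Decidable (Spec_normalize_tokens_java tokens out) := by unfold Spec_normalize_tokens_java; infer_instance

-- ===== CLAIM (what is proved, stated in full; the proofs are below) =====
def Claim_equal_normalize_tokens_java : Prop := ∀ (tokens : List String), Dom_normalize_tokens_java tokens → Pre_normalize_tokens_java tokens → Spec_normalize_tokens_java tokens (normalize_tokens_java tokens)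

-- ===== LEMMAS AND PROOFS =====

-- pass 1 never disturbs a key already present
lemma bMap_mono (l : List String) (m : PySem.Dict String String) (k : String) (v : String)
    (h : m.get? k = some v) : (l.foldl bMapStep m).get? k = some v := by
  induction l generalizing m with
  | nil => exact h
  | cons tok rest ih =>
    apply ih
    unfold bMapStep
    split
    · exact h
    · split
      · split
        · rename_i hc
          have hne : k ≠ tok := by
            intro he; subst he
            simp only [Bool.and_eq_true, decide_eq_true_eq] at hc
            rw [PySem.Dict.contains_eq_isSome_get?, h] at hc
            simp at hc
          rw [PySem.Dict.get?_insert_of_ne]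
          · exact h
          · exact hne
        · exact h
      · exact h

-- lookup after pass 1 is stable for a key already in m
lemma bMap_getD (rest : List String) (m : PySem.Dict String String) (tok : String) (v : String)
    (hv : m.get? tok = some v) :
    (rest.foldl bMapStep m).getD tok "" = m.getD tok "" := by
  rw [PySem.Dict.getD_of_get?_eq_some (h := bMap_mono rest _ _ _ hv),
      PySem.Dict.getD_of_get?_eq_some (h := hv)]

-- the joint loop invariant: A's fold from (out, m, |m|+1) equals out ++ pass-2 of the rest
-- under the map pass 1 builds from m
lemma loop_eq (rest : List String) : ∀ (out : List String) (m : PySem.Dict String String),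
    (rest.foldl normAStep (out, m, (m.size : Int) + 1)).1
      = out ++ rest.map (bRewrite (rest.foldl bMapStep m)) := by
  induction rest with
  | nil => intro out m; simp
  | cons tok rest ih =>
    intro out m
    simp only [List.foldl_cons, List.map_cons]
    by_cases hkw : tok ∈ jKeywords
    · have ha : normAStep (out, m, (m.size : Int) + 1) tok = (out ++ [tok], m, (m.size : Int) + 1) := by
        simp [normAStep, hkw]
      have hb : bMapStep m tok = m := by simp [bMapStep, hkw]
      rw [ha, hb, ih (out ++ [tok]) m]
      simp [bRewrite, hkw]
    · by_cases hdig : PySem.Chars.strIsdigit tok.toList = true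
      · have ha : normAStep (out, m, (m.size : Int) + 1) tok = (out ++ ["NUM"], m, (m.size : Int) + 1) := by
          simp [normAStep, hkw, hdig]
        have hb : bMapStep m tok = m := by simp [bMapStep, hkw, hdig]
        rw [ha, hb, ih (out ++ ["NUM"]) m]
        simp [bRewrite, hkw, hdig]
      · rcases hg : PySem.List.pyGet? tok.toList 0 with _ | c
        · have ha : normAStep (out, m, (m.size : Int) + 1) tok = (out ++ [tok], m, (m.size : Int) + 1) := by
            simp [normAStep, hkw, hdig, hg]
          have hb : bMapStep m tok = m := by simp [bMapStep, hkw, hdig, hg]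
          rw [ha, hb, ih (out ++ [tok]) m]
          simp [bRewrite, hkw, hdig, hg]
        · by_cases hid : (PySem.Chars.isalpha c = true ∨ c = '_')
          · by_cases hmem : m.contains tok = false
            · -- new identifier: both sides insert the same entry
              set v : String := "ID" ++ PySem.Int.toStr ((m.size : Int) + 1) with hv
              have ha : normAStep (out, m, (m.size : Int) + 1) tok
                  = (out ++ [(m.insert tok v).getD tok ""], m.insert tok v, (m.size : Int) + 1 + 1) := by
                simp [normAStep, hkw, hdig, hg, hid, hmem, hv, PySem.Dict.getD_insert_self]
              have hb : bMapStep m tok = m.insert tok v := by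
                simp [bMapStep, hkw, hdig, hg, hid, hmem, hv]
              have hsz : (m.size : Int) + 1 + 1 = ((m.insert tok v).size : Int) + 1 := by
                rw [PySem.Dict.size_insert, hmem]; push_cast; ring
              rw [ha, hb, hsz, ih (out ++ [(m.insert tok v).getD tok ""]) (m.insert tok v)]
              have hlook := bMap_getD rest (m.insert tok v) tok v (PySem.Dict.get?_insert_self m tok v)
              simp [bRewrite, hkw, hdig, hg, hid, hlook]
            · -- known identifier: map unchanged, lookup stable
              simp only [Bool.not_eq_false] at hmem
              have ha : normAStep (out, m, (m.size : Int) + 1) tok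
                  = (out ++ [m.getD tok ""], m, (m.size : Int) + 1) := by
                simp [normAStep, hkw, hdig, hg, hid, hmem]
              have hb : bMapStep m tok = m := by simp [bMapStep, hkw, hdig, hg, hid, hmem]
              obtain ⟨w, hw⟩ : ∃ w, m.get? tok = some w := by
                rw [PySem.Dict.contains_eq_isSome_get?] at hmem
                exact Option.isSome_iff_exists.mp hmem
              have hlook := bMap_getD rest m tok w hw
              rw [ha, hb, ih (out ++ [m.getD tok ""]) m]
              simp [bRewrite, hkw, hdig, hg, hid, hlook]
          · -- symbol
            have ha : normAStep (out, m, (m.size : Int) + 1) tok = (out ++ [tok], m, (m.size : Int) + 1) := by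
              simp [normAStep, hkw, hdig, hg, hid]
            have hb : bMapStep m tok = m := by simp [bMapStep, hkw, hdig, hg, hid]
            rw [ha, hb, ih (out ++ [tok]) m]
            simp [bRewrite, hkw, hdig, hg, hid]

-- ===== VERDICT (by name: the statement is the Claim_ definition above) =====
theorem normalize_tokens_java_spec : Claim_equal_normalize_tokens_java := by
  intro tokens _ _
  unfold Spec_normalize_tokens_java normalize_tokens_java normalize_tokens_java_alt
  have := loop_eq tokens [] PySem.Dict.empty
  simpa [PySem.Dict.size_empty] using this
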